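-- pv_equiv track=rewrite | github.com/Ziqiao-git/benchmark | data_anaylysis/random_judges.py | get_subset_round_winner
-- ===== SOURCE A (Python) =====
-- from collections import Counter, defaultdict
--
-- def get_subset_round_winner(judge_votes, chosen_judges):
--     """
--     Return the majority winner across chosen_judges in one round.
--     Same logic as get_round_winner_all_judges, but restricted subset.
--     """
--     tally = Counter()
--     for j in chosen_judges:
--         if j in judge_votes:
--             w = judge_votes[j].get("winner")
--             if w is not None:
--                 tally[w] += 1
--
--     if not tally:
--         return None
--
--     best_label, best_count = None, 0
--     multiple_best = False
--     for label, count in tally.items():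
--         if count > best_count:
--             best_label = label
--             best_count = count
--             multiple_best = False
--         elif count == best_count:
--             multiple_best = True
--
--     if multiple_best or best_label == "tie":
--         return "tie"
--     return best_label
-- ===== SOURCE B (Python) =====
-- def get_subset_round_winner(judge_votes, chosen_judges):
--     """Majority winner over the chosen judges' votes, via sorted distinct
--     labels and per-label recount instead of an incremental Counter tally."""
--     votes = [judge_votes[j].get("winner") for j in chosen_judges if j in judge_votes]
--     votes = [v for v in votes if v is not None]
--     if not votes:
--         return None
--     labels = sorted(set(votes))
--     counts = [votes.count(l) for l in labels]
--     m = max(counts)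
--     top = [l for l, c in zip(labels, counts) if c == m]
--     if len(top) > 1 or top[0] == "tie":
--         return "tie"
--     return top[0]
-- ===== Notes on version B (the rewrite author's own statement) =====
-- stated objective: alternative
-- what changed: Drops the Counter/hash tally and the stateful single-pass argmax entirely: B flattens the votes, takes the sorted distinct labels, recounts each label with list.count (O(n*k) brute force, order-independent since a returned winner is unique), then takes the max count and the list of top labels for the tie test.
import Mathlib
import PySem

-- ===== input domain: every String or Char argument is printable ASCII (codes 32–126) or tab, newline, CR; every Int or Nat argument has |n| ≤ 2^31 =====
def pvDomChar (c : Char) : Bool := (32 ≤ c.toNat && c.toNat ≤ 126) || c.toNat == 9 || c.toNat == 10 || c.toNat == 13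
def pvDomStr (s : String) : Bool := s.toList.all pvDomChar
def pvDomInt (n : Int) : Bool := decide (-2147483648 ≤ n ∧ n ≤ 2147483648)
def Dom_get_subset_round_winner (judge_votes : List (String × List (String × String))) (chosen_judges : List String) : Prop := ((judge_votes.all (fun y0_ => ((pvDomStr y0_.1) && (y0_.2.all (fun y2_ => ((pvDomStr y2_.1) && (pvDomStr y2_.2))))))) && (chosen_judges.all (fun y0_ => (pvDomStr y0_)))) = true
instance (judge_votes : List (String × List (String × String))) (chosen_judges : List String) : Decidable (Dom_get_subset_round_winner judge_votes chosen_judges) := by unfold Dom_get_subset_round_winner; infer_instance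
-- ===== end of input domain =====

-- B drops the Counter tally and the stateful single-pass argmax: it recounts each sorted
-- distinct label with list.count and tie-tests via the max count (alternative, same results).

-- ===== PORT A =====
def get_subset_round_winner (judge_votes : List (String × List (String × String))) (chosen_judges : List String) : Option String :=
  let tally : PySem.Dict String Int := chosen_judges.foldl (fun t j =>
    match (PySem.Dict.mk judge_votes).get? j with
    | none => t
    | some d =>
      match (PySem.Dict.mk d).get? "winner" with
      | none => t
      | some w => t.modify w 0 (· + 1)) PySem.Dict.empty
  if tally.items = [] then none
  else
    let r := tally.items.foldl (fun (s : Option String × Int × Bool) p =>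
      if s.2.1 < p.2 then (some p.1, p.2, false)
      else if p.2 = s.2.1 then (s.1, s.2.1, true)
      else s) (none, 0, false)
    if r.2.2 || r.1 == some "tie" then some "tie" else r.1

-- ===== PORT B =====
def get_subset_round_winner_alt (judge_votes : List (String × List (String × String))) (chosen_judges : List String) : Option String :=
  let votes : List String := (chosen_judges.filterMap (fun j =>
    ((PySem.Dict.mk judge_votes).get? j).map (fun d => (PySem.Dict.mk d).get? "winner"))).filterMap id
  if votes = [] then none
  else
    let labels := PySem.List.sorted (PySem.Set.ofList votes) (fun x => x) false
    let counts := labels.map (fun l => (PySem.List.count votes l : Int))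
    match PySem.List.max? counts (fun x => x) with
    | none => none  -- unreachable: counts is nonempty here; max() cannot raise
    | some m =>
      let top := ((labels.zip counts).filter (fun p => p.2 == m)).map (·.1)
      if top.length > 1 then some "tie"
      else match PySem.List.pyGet? top 0 with
        | none => none  -- unreachable IndexError: the max count is attained
        | some t => if t == "tie" then some "tie" else some t

-- ===== PRECONDITION & SPEC =====
def Spec_get_subset_round_winner (judge_votes : List (String × List (String × String))) (chosen_judges : List String) (out : Option String) : Prop := out = get_subset_round_winner_alt judge_votes chosen_judges
instance (judge_votes : List (String × List (String × String))) (chosen_judges : List String) (out : Option String) : Decidable (Spec_get_subset_round_winner judge_votes chosen_judges out) := by unfold Spec_get_subset_round_winner; infer_instance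

-- ===== CLAIM (what is proved, stated in full; the proofs are below) =====
def Claim_equal_get_subset_round_winner : Prop := ∀ (judge_votes : List (String × List (String × String))) (chosen_judges : List String), Dom_get_subset_round_winner judge_votes chosen_judges → Spec_get_subset_round_winner judge_votes chosen_judges (get_subset_round_winner judge_votes chosen_judges)

-- ===== LEMMAS AND PROOFS =====

-- the flat vote sequence both implementations count
def pvVotes (judge_votes : List (String × List (String × String))) (chosen_judges : List String) : List String :=
  (chosen_judges.filterMap (fun j =>
    ((PySem.Dict.mk judge_votes).get? j).map (fun d => (PySem.Dict.mk d).get? "winner"))).filterMap id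

-- A's tally loop is the Counter fold over the flat vote sequence
theorem tallyA_eq (judge_votes : List (String × List (String × String))) (chosen_judges : List String) (t : PySem.Dict String Int) :
    chosen_judges.foldl (fun t j =>
      match (PySem.Dict.mk judge_votes).get? j with
      | none => t
      | some d =>
        match (PySem.Dict.mk d).get? "winner" with
        | none => t
        | some w => t.modify w 0 (· + 1)) t
    = (pvVotes judge_votes chosen_judges).foldl (fun t w => t.modify w 0 (· + 1)) t := by
  induction chosen_judges generalizing t with
  | nil => rfl
  | cons j js ih =>
    simp only [pvVotes, List.foldl_cons, List.filterMap_cons] at *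
    cases h1 : (PySem.Dict.mk judge_votes).get? j with
    | none => simp [ih]
    | some d =>
      cases h2 : (PySem.Dict.mk d).get? "winner" with
      | none => simp [h2, ih]
      | some w => simp [h2, ih]

-- running max of the counts as A's fold sees it
def pvMx (l : List (String × Int)) : Int := l.foldl (fun a p => max a p.2) 0

theorem pvMx_isMax (l : List (String × Int)) : ∀ p ∈ l, p.2 ≤ pvMx l :=
  fun p hp => (PySem.List.le_foldl_max_int l (·.2) 0).2 p hp

theorem pvMx_mem (l : List (String × Int)) (hne : l ≠ []) (hpos : ∀ p ∈ l, 0 < p.2) :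
    ∃ p ∈ l, p.2 = pvMx l := by
  induction l using List.reverseRecOn with
  | nil => exact absurd rfl hne
  | append_singleton l p ih =>
    have hMx : pvMx (l ++ [p]) = max (pvMx l) p.2 := by simp [pvMx]
    rcases eq_or_ne l [] with rfl | hl
    · refine ⟨p, by simp, ?_⟩
      have := hpos p (by simp)
      simp [pvMx]; omega
    · rcases ih hl (fun q hq => hpos q (by simp [hq])) with ⟨q, hq, hqe⟩
      rcases le_or_gt p.2 (pvMx l) with h | h
      · exact ⟨q, by simp [hq], by rw [hMx]; omega⟩
      · exact ⟨p, by simp, by rw [hMx]; omega⟩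

-- characterisation of A's stateful argmax fold: first maximal label, the max, and the tie flag
theorem foldA_spec (l : List (String × Int)) (hne : l ≠ []) (hpos : ∀ p ∈ l, 0 < p.2) :
    l.foldl (fun (s : Option String × Int × Bool) p =>
      if s.2.1 < p.2 then (some p.1, p.2, false)
      else if p.2 = s.2.1 then (s.1, s.2.1, true)
      else s) (none, 0, false)
    = ((l.find? (fun p => p.2 == pvMx l)).map Prod.fst, pvMx l,
        decide (2 ≤ l.countP (fun p => p.2 == pvMx l))) := by
  induction l using List.reverseRecOn with
  | nil => exact absurd rfl hne
  | append_singleton l p ih =>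
    have hMx : pvMx (l ++ [p]) = max (pvMx l) p.2 := by simp [pvMx]
    rcases eq_or_ne l [] with rfl | hl
    · have hp := hpos p (by simp)
      have : pvMx [p] = p.2 := by simp [pvMx]; omega
      simp [this, hp]
    · have hposl : ∀ q ∈ l, 0 < q.2 := fun q hq => hpos q (by simp [hq])
      have hIH := ih hl hposl
      rw [List.foldl_append, hIH]
      simp only [List.foldl_cons, List.foldl_nil]
      rcases lt_trichotomy (pvMx l) p.2 with h | h | h
      · have hMx' : pvMx (l ++ [p]) = p.2 := by rw [hMx]; omega
        have hfl : l.find? (fun q => q.2 == p.2) = none := by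
          rw [List.find?_eq_none]
          intro q hq
          have := pvMx_isMax l q hq
          simp only [beq_iff_eq]; omega
        have hcl : l.countP (fun q => q.2 == p.2) = 0 := by
          rw [List.countP_eq_zero]
          intro q hq
          have := pvMx_isMax l q hq
          simp only [beq_iff_eq]; omega
        rw [hMx']
        simp [h, List.find?_append, hfl, List.countP_append, hcl]
      · rcases pvMx_mem l hl hposl with ⟨q, hq, hqe⟩
        have hMx' : pvMx (l ++ [p]) = pvMx l := by rw [hMx]; omega
        rcases Option.isSome_iff_exists.mp (by rw [List.find?_isSome]; exact ⟨q, hq, by simp [hqe]⟩ :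
          (l.find? (fun q => q.2 == pvMx l)).isSome) with ⟨r, hr⟩
        have hcl : 1 ≤ l.countP (fun q => q.2 == pvMx l) := by
          rw [Nat.one_le_iff_ne_zero, Ne, List.countP_eq_zero]
          push Not
          exact ⟨q, hq, by simp [hqe]⟩
        rw [hMx']
        rw [h] at hcl hr
        simp [h, List.find?_append, hr, List.countP_append]
        exact ⟨q.1, by rw [← h, ← hqe]; exact hq⟩
      · rcases pvMx_mem l hl hposl with ⟨q, hq, hqe⟩
        have hMx' : pvMx (l ++ [p]) = pvMx l := by rw [hMx]; omega
        rcases Option.isSome_iff_exists.mp (by rw [List.find?_isSome]; exact ⟨q, hq, by simp [hqe]⟩ :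
          (l.find? (fun q => q.2 == pvMx l)).isSome) with ⟨r, hr⟩
        have hne2 : ¬ (p.2 = pvMx l) := by omega
        rw [hMx']
        simp [List.find?_append, hr, List.countP_append, hne2,
              show ¬ (pvMx l < p.2) from by omega]

-- counts in a counter's items are positive
theorem counter_items_pos (xs : List String) :
    ∀ p ∈ (PySem.Dict.counter (κ := String) xs).items, 0 < p.2 := by
  intro p hp
  rw [PySem.Dict.items_counter] at hp
  rcases List.mem_map.mp hp with ⟨k, hk, rfl⟩
  have hm : k ∈ xs := (PySem.Set.mem_ofList xs k).mp hk
  have : 1 ≤ xs.count k := List.count_pos_iff.mpr hm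
  simp only []
  omega

-- set(xs) is empty iff xs is
theorem ofList_nil_iff (xs : List String) : PySem.Set.ofList xs = [] ↔ xs = [] := by
  constructor
  · intro h
    cases xs with
    | nil => rfl
    | cons a t =>
      have : a ∈ PySem.Set.ofList (a :: t) := (PySem.Set.mem_ofList _ a).mpr (by simp)
      rw [h] at this
      simp at this
  · intro h; subst h; rfl

-- the max of a nonempty positive Int list, as B's max() computes it, is permutation-invariant
-- and agrees with A's 0-seeded running max
theorem max_perm_eq (c0 : Int) (ct l2 : List Int) (hperm : (c0 :: ct).Perm l2)
    (hpos : ∀ x ∈ l2, 0 < x) :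
    ct.foldl max c0 = l2.foldl max 0 := by
  have h1le := PySem.List.le_foldl_max ct c0
  have h1mem := PySem.List.foldl_max_mem ct c0
  have h2le := PySem.List.le_foldl_max l2 0
  have h2mem := PySem.List.foldl_max_mem l2 0
  have hm1 : ct.foldl max c0 ∈ (c0 :: ct) := by
    rcases h1mem with h | h
    · rw [h]; simp
    · simp [h]
  have hm1' : ct.foldl max c0 ∈ l2 := hperm.mem_iff.mp hm1
  have hub1 : ∀ y ∈ l2, y ≤ ct.foldl max c0 := by
    intro y hy
    rcases List.mem_cons.mp (hperm.mem_iff.mpr hy) with h | h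
    · rw [h] at *; exact h1le.1
    · exact h1le.2 y h
  have hm2 : l2.foldl max 0 ∈ l2 := by
    rcases h2mem with h | h
    · exfalso
      have := hpos _ hm1'
      have := h2le.2 _ hm1'
      omega
    · exact h
  have := hub1 _ hm2
  have := h2le.2 _ hm1'
  omega

-- both ports do the same thing after flattening the votes
theorem tail_eq (xs : List String) :
    (if (PySem.Dict.counter (κ := String) xs).items = [] then (none : Option String)
     else
       let r := (PySem.Dict.counter (κ := String) xs).items.foldl
         (fun (s : Option String × Int × Bool) p =>
           if s.2.1 < p.2 then (some p.1, p.2, false)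
           else if p.2 = s.2.1 then (s.1, s.2.1, true)
           else s) (none, 0, false)
       if r.2.2 || r.1 == some "tie" then some "tie" else r.1)
    =
    (if xs = [] then none
     else
       match PySem.List.max? ((PySem.List.sorted (PySem.Set.ofList xs) (fun x => x) false).map
           (fun l => (PySem.List.count xs l : Int))) (fun x => x) with
       | none => none
       | some m =>
         if ((((PySem.List.sorted (PySem.Set.ofList xs) (fun x => x) false).zip
               ((PySem.List.sorted (PySem.Set.ofList xs) (fun x => x) false).map
                 (fun l => (PySem.List.count xs l : Int)))).filter (fun p => p.2 == m)).map (·.1)).length > 1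
         then some "tie"
         else match PySem.List.pyGet? ((((PySem.List.sorted (PySem.Set.ofList xs) (fun x => x) false).zip
               ((PySem.List.sorted (PySem.Set.ofList xs) (fun x => x) false).map
                 (fun l => (PySem.List.count xs l : Int)))).filter (fun p => p.2 == m)).map (·.1)) 0 with
           | none => none
           | some t => if t == "tie" then some "tie" else some t) := by
  have hitems := PySem.Dict.items_counter (κ := String) xs
  by_cases hx : xs = []
  · subst hx; simp [hitems]
  · have hS : PySem.Set.ofList xs ≠ [] := fun h => hx ((ofList_nil_iff xs).mp h)
    have hnil : (PySem.Dict.counter (κ := String) xs).items ≠ [] := by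
      rw [hitems]; simpa using hS
    rw [if_neg hnil, if_neg hx]
    have hpos := counter_items_pos xs
    set g : String → Int := fun l => (xs.count l : Int) with hg
    have hgc : (fun l => (PySem.List.count xs l : Int)) = g := by
      funext l; rw [PySem.List.count_eq]
    set S := PySem.Set.ofList xs with hSdef
    set labels := PySem.List.sorted S (fun x => x) false with hlab
    have hlperm : labels.Perm S := PySem.List.sorted_perm S _ false
    have hlne : labels ≠ [] :=
      fun h => hS ((PySem.List.sorted_eq_nil_iff S (fun x => x) false).mp h)
    set f : String → String × Int := fun k => (k, g k) with hf
    have hL : (PySem.Dict.counter (κ := String) xs).items = S.map f := hitems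
    set Mx := pvMx ((PySem.Dict.counter (κ := String) xs).items) with hMx
    -- A's side by the fold characterisation
    rw [foldA_spec _ hnil hpos]
    -- B's max equals Mx
    obtain ⟨c0, ct, hcts⟩ : ∃ c0 ct, labels.map g = c0 :: ct := by
      cases hc : labels.map g with
      | nil => exact absurd (List.map_eq_nil_iff.mp hc) hlne
      | cons a t => exact ⟨a, t, rfl⟩
    have hcperm : (c0 :: ct).Perm (S.map g) := hcts ▸ hlperm.map g
    have hpos2 : ∀ x ∈ S.map g, 0 < x := by
      intro x hxm
      rcases List.mem_map.mp hxm with ⟨k, hk, rfl⟩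
      exact hpos (f k) (by rw [hL]; exact List.mem_map.mpr ⟨k, hk, rfl⟩)
    have hMx2 : pvMx (S.map f) = (S.map g).foldl max 0 := by
      simp [pvMx, List.foldl_map, hf]
    have hmax : PySem.List.max? (labels.map g) (fun x => x) = some Mx := by
      rw [hcts, PySem.List.max?_id_cons, hMx, hL, hMx2]
      exact congrArg some (max_perm_eq c0 ct (S.map g) hcperm hpos2)
    rw [hgc, hmax]
    dsimp only
    -- B's top list vs A's filter
    have hzip : labels.zip (labels.map g) = labels.map f := by
      have := List.zip_map' (f := (id : String → String)) (g := g) (l := labels)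
      simpa [hf] using this
    have htop : ((labels.zip (labels.map g)).filter (fun p => p.2 == Mx)).map (·.1)
        = labels.filter (fun l => g l == Mx) := by
      rw [hzip, List.filter_map]
      have : ((fun p : String × Int => p.2 == Mx) ∘ f) = (fun l => g l == Mx) := rfl
      rw [this, List.map_map]
      have hid : ((fun x : String × Int => x.1) ∘ fun k : String => (k, g k)) = id := rfl
      rw [hid, List.map_id]
    rw [htop]
    have hAfilter : ((PySem.Dict.counter (κ := String) xs).items).filter (fun p => p.2 == Mx)
        = (S.filter (fun l => g l == Mx)).map f := by
      rw [hL, List.filter_map]; rfl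
    have htperm : (labels.filter (fun l => g l == Mx)).Perm (S.filter (fun l => g l == Mx)) :=
      hlperm.filter _
    have hcnt : ((PySem.Dict.counter (κ := String) xs).items).countP (fun p => p.2 == Mx)
        = (labels.filter (fun l => g l == Mx)).length := by
      rw [List.countP_eq_length_filter, hAfilter, List.length_map, htperm.length_eq]
    -- the max is attained: the filters are nonempty
    obtain ⟨q, hq, hqe⟩ := pvMx_mem _ hnil hpos
    have hqS : ∃ k ∈ S, g k = Mx := by
      rw [hL] at hq
      rcases List.mem_map.mp hq with ⟨k, hk, rfl⟩
      exact ⟨k, hk, hqe⟩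
    have hfilne : S.filter (fun l => g l == Mx) ≠ [] := by
      rcases hqS with ⟨k, hk, hke⟩
      intro h
      have : k ∈ S.filter (fun l => g l == Mx) := List.mem_filter.mpr ⟨hk, by simp [hke]⟩
      rw [h] at this; simp at this
    have hlen1 : 1 ≤ (labels.filter (fun l => g l == Mx)).length := by
      rw [htperm.length_eq]
      exact Nat.one_le_iff_ne_zero.mpr (by simpa [List.length_eq_zero_iff] using hfilne)
    rcases eq_or_lt_of_le hlen1 with h1 | h2
    · -- unique winner
      obtain ⟨k, hk⟩ : ∃ k, labels.filter (fun l => g l == Mx) = [k] :=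
        List.length_eq_one_iff.mp h1.symm
      have hSfil : S.filter (fun l => g l == Mx) = [k] :=
        List.perm_singleton.mp (hk ▸ htperm.symm)
      have hfind : ((PySem.Dict.counter (κ := String) xs).items).find? (fun p => p.2 == Mx)
          = some (f k) := by
        rw [← List.head?_filter, hAfilter, hSfil]; rfl
      rw [hfind]
      have hc2 : ¬ (2 ≤ ((PySem.Dict.counter (κ := String) xs).items).countP (fun p => p.2 == Mx)) := by
        rw [hcnt, hk]; simp
      simp only [hk]
      simp [PySem.List.pyGet?, PySem.List.pyIdx?, hf]
      by_cases ht : k = "tie"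
      · simp [ht]
      · simp [ht]
        intro hcc
        rw [← hMx] at hcc
        exact absurd hcc hc2
    · -- several winners: both sides return "tie"
      have hc2 : 2 ≤ ((PySem.Dict.counter (κ := String) xs).items).countP (fun p => p.2 == Mx) := by
        rw [hcnt]; omega
      simp [h2]
      intro h
      rw [← hMx] at h
      exact absurd hc2 (by omega)

-- ===== VERDICT (by name: the statement is the Claim_ definition above) =====
theorem get_subset_round_winner_spec : Claim_equal_get_subset_round_winner := by
  intro jv cj _
  unfold Spec_get_subset_round_winner get_subset_round_winner get_subset_round_winner_alt
  simp only []
  rw [tallyA_eq, ← PySem.Dict.counter_eq_foldl]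
  exact tail_eq (pvVotes jv cj)
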